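-- pv_equiv track=rewrite | github.com/adolescent/Lulab_OI_Infrastructure | OI_Functions/Stimulus_dRR_Calculator.py | Find_Condition_IDs
-- ===== SOURCE A (Python) =====
-- def Find_Condition_IDs(series,id):
--
--     # get conditions first
--     result_series = []
--     current_series = []
--     for i, num in enumerate(series):
--         if num == id:
--             current_series.append(i)
--         else:
--             if len(current_series) > 0:
--                 result_series.append(current_series)
--             current_series = []
--     if len(current_series) > 0:
--         result_series.append(current_series)
--     # cut conditions of the same length
--     condition_len = min(len(sublist) for sublist in result_series)
--     result_series = [sublist[:condition_len] for sublist in result_series]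
--
--     return result_series,condition_len
-- ===== SOURCE B (Python) =====
-- def Find_Condition_IDs(series, id):
--     # flat pass: collect positions of id, then split on gaps
--     positions = [i for i, num in enumerate(series) if num == id]
--     runs = []
--     for p in positions:
--         if runs and p == runs[-1][-1] + 1:
--             runs[-1].append(p)
--         else:
--             runs.append([p])
--     condition_len = min(len(r) for r in runs)
--     return [r[:condition_len] for r in runs], condition_len
-- ===== Notes on version B (the rewrite author's own statement) =====
-- stated objective: alternative
-- what changed: Replaces A's single state machine that interleaves run-building and flushing over the series with a flat decomposition: first collect all positions of id, then split that position list on gaps into runs.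
-- outside the precondition, e.g. on Find_Condition_IDs([0, 2, 0], 1): A raises ValueError, B raises ValueError
import Mathlib
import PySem

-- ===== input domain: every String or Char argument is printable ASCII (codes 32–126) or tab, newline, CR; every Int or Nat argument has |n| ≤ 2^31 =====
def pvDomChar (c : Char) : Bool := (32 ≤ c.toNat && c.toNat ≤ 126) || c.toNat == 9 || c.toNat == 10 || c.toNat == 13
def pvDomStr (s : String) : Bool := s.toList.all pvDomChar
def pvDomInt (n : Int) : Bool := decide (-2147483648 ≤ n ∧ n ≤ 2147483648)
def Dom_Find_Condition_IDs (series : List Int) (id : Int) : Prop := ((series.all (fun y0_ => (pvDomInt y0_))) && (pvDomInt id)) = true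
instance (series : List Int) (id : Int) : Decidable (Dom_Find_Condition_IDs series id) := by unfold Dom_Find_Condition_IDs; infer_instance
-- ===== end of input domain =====

-- B replaces A's interleaved run/flush state machine by a flat 'collect positions, split on gaps'
-- decomposition (objective: alternative; same cost). Equivalence is over the return value only.

-- ===== PORT A =====
-- one loop step of A: append index to current run, or flush the current run
def aStep (id : Int) (st : List (List Int) × List Int) (p : Int × Int) :
    List (List Int) × List Int :=
  if p.2 = id then (st.1, st.2 ++ [p.1])
  else if st.2.length > 0 then (st.1 ++ [st.2], []) else (st.1, [])

def Find_Condition_IDs (series : List Int) (id : Int) : List (List Int) × Int :=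
  let st := (PySem.List.enumerate series 0).foldl (aStep id) ([], [])
  let result := if st.2.length > 0 then st.1 ++ [st.2] else st.1
  match PySem.List.min? (result.map (fun s => (s.length : Int))) (fun x => x) with
  | none => ([], 0)   -- Python raises ValueError here (id never appears); excluded by Pre_
  | some m => (result.map (fun s => PySem.List.slice s none (some m)), m)

-- ===== PORT B =====
-- one loop step of B: extend the last run on a consecutive position, else open a new run
def bStep (runs : List (List Int)) (p : Int) : List (List Int) :=
  match runs.getLast? with
  | some r =>
    match r.getLast? with
    | some last => if p = last + 1 then runs.dropLast ++ [r ++ [p]] else runs ++ [[p]]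
    | none => runs ++ [[p]]
  | none => runs ++ [[p]]

def Find_Condition_IDs_alt (series : List Int) (id : Int) : List (List Int) × Int :=
  let positions := ((PySem.List.enumerate series 0).filter (fun p => p.2 = id)).map (·.1)
  let runs := positions.foldl bStep []
  match PySem.List.min? (runs.map (fun r => (r.length : Int))) (fun x => x) with
  | none => ([], 0)   -- Python raises ValueError here; excluded by Pre_
  | some m => (runs.map (fun r => PySem.List.slice r none (some m)), m)

-- ===== PRECONDITION & SPEC =====
-- Pre_ excludes inputs where id never occurs in series: there both Pythons raise ValueError
-- (min() of an empty sequence), so A returns no value.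
def Pre_Find_Condition_IDs (series : List Int) (id : Int) : Prop := id ∈ series
instance (series : List Int) (id : Int) : Decidable (Pre_Find_Condition_IDs series id) := by
  unfold Pre_Find_Condition_IDs; infer_instance

def pvWitness_Find_Condition_IDs : List Int × Int := ([1, 1, 0, 1], 1)

def Spec_Find_Condition_IDs (series : List Int) (id : Int) (out : List (List Int) × Int) : Prop :=
  out = Find_Condition_IDs_alt series id
instance (series : List Int) (id : Int) (out : List (List Int) × Int) :
    Decidable (Spec_Find_Condition_IDs series id out) := by
  unfold Spec_Find_Condition_IDs; infer_instance

-- ===== CLAIM (what is proved, stated in full; the proofs are below) =====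
def Claim_equal_Find_Condition_IDs : Prop := ∀ (series : List Int) (id : Int),
  Dom_Find_Condition_IDs series id → Pre_Find_Condition_IDs series id →
  Spec_Find_Condition_IDs series id (Find_Condition_IDs series id)

-- ===== LEMMAS AND PROOFS =====

-- A's finishing flush of the loop state
def flushA (st : List (List Int) × List Int) : List (List Int) :=
  if st.2.length > 0 then st.1 ++ [st.2] else st.1

-- invariant of A's loop state before processing index i
def InvA (i : Int) (res : List (List Int)) (cur : List Int) : Prop :=
  (∀ r ∈ res, ∀ x ∈ r, x + 1 < i) ∧
  (cur ≠ [] → cur.getLast? = some (i - 1)) ∧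
  (∀ x ∈ cur, x < i)

lemma bStep_eq_flush_append (i : Int) (res : List (List Int)) (cur : List Int)
    (h : InvA i res cur) :
    bStep (flushA (res, cur)) i = flushA (res, cur ++ [i]) := by
  obtain ⟨hres, hcur, hlt⟩ := h
  by_cases hc : cur = []
  · subst hc
    simp only [flushA, List.length_nil, List.nil_append]
    simp only [gt_iff_lt, Nat.lt_irrefl, if_false, List.length_cons,
      List.length_nil]
    have hpos : (0 : Nat) < 0 + (0 + 1) := by omega
    simp only [if_pos hpos]
    -- goal: bStep res i = res ++ [[i]]
    rcases hlast : res.getLast? with _ | r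
    · simp [bStep, hlast]
    · rcases hrl : r.getLast? with _ | x
      · simp [bStep, hlast, hrl]
      · have hrmem : r ∈ res := List.mem_of_getLast? hlast
        have hxmem : x ∈ r := List.mem_of_getLast? hrl
        have : x + 1 < i := hres r hrmem x hxmem
        simp [bStep, hlast, hrl]
        intro hxe; omega
  · have hlen : cur.length > 0 := List.length_pos_iff.mpr hc
    simp only [flushA, if_pos hlen]
    have hlen2 : (cur ++ [i]).length > 0 := by simp
    simp only [if_pos hlen2]
    have hgl : (res ++ [cur]).getLast? = some cur := by simp
    have hcl : cur.getLast? = some (i - 1) := hcur hc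
    simp only [bStep, hgl, hcl]
    have : i = (i - 1) + 1 := by omega
    simp only [if_pos this, List.dropLast_concat]

lemma key (l : List Int) (id : Int) : ∀ (i : Int) (res : List (List Int)) (cur : List Int),
    InvA i res cur →
    flushA ((PySem.List.enumerate l i).foldl (aStep id) (res, cur))
      = (((PySem.List.enumerate l i).filter (fun p => p.2 = id)).map (·.1)).foldl bStep
          (flushA (res, cur)) := by
  induction l with
  | nil => intro i res cur _; simp [PySem.List.enumerate_nil]
  | cons x t ih =>
    intro i res cur h
    obtain ⟨hres, hcur, hlt⟩ := h
    rw [PySem.List.enumerate_cons]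
    by_cases hx : x = id
    · simp only [List.foldl_cons, List.filter_cons, hx, decide_true, if_true, List.map_cons]
      have hstep : aStep id (res, cur) (i, id) = (res, cur ++ [i]) := by
        simp [aStep]
      rw [hstep, bStep_eq_flush_append i res cur ⟨hres, hcur, hlt⟩]
      apply ih
      refine ⟨fun r hr y hy => by have := hres r hr y hy; omega, ?_, ?_⟩
      · intro _; simp
      · intro y hy
        rcases List.mem_append.mp hy with h1 | h2
        · have := hlt y h1; omega
        · simp at h2; omega
    · simp only [List.foldl_cons, List.filter_cons, hx, decide_false]
      have hstep : aStep id (res, cur) (i, x) = (flushA (res, cur), []) := by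
        by_cases hc : cur = []
        · subst hc; simp [aStep, hx, flushA]
        · have : cur.length > 0 := List.length_pos_iff.mpr hc
          simp [aStep, hx, flushA, this]
      rw [hstep]
      have hfl : flushA (flushA (res, cur), []) = flushA (res, cur) := by
        simp [flushA]
      rw [← hfl]
      apply ih
      refine ⟨?_, by simp, by simp⟩
      intro r hr y hy
      by_cases hc : cur = []
      · subst hc
        simp only [flushA, List.length_nil] at hr
        have := hres r hr y hy; omega
      · have hlenc : cur.length > 0 := List.length_pos_iff.mpr hc
        simp only [flushA, if_pos hlenc] at hr
        rcases List.mem_append.mp hr with h1 | h2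
        · have := hres r h1 y hy; omega
        · simp at h2; subst h2
          have := hlt y hy; omega

lemma runs_eq (series : List Int) (id : Int) :
    (let st := (PySem.List.enumerate series 0).foldl (aStep id) ([], []);
     if st.2.length > 0 then st.1 ++ [st.2] else st.1)
      = (((PySem.List.enumerate series 0).filter (fun p => p.2 = id)).map (·.1)).foldl bStep [] := by
  have h := key series id 0 [] [] ⟨by simp, by simp, by simp⟩
  simpa [flushA] using h

-- ===== VERDICT (by name: the statement is the Claim_ definition above) =====
theorem Find_Condition_IDs_spec : Claim_equal_Find_Condition_IDs := by
  intro series id _ _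
  unfold Spec_Find_Condition_IDs Find_Condition_IDs Find_Condition_IDs_alt
  simp only [runs_eq]
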